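-- pv_equiv track=rewrite | github.com/shalgrim/advent_of_code_2020 | python/day21_1.py | cant_be_allergen
-- ===== SOURCE A (Python) =====
-- from copy import copy
--
-- def cant_be_allergen(foods):
--     all_ingredients = set()
--     all_allergens = set()
--
--     for food in foods:
--         all_ingredients.update(food[0])
--         all_allergens.update(food[1])
--
--     allergen_possibilities = {}
--
--     for allergen in all_allergens:
--         for food in foods:
--             if allergen in food[1]:
--                 if allergen not in allergen_possibilities:
--                     allergen_possibilities[allergen] = copy(food[0])
--                 else:
--                     allergen_possibilities[allergen].intersection_update(food[0])
--
--     potential_allergens = set()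
--     for p in allergen_possibilities.values():
--         potential_allergens.update(p)
--
--     return all_ingredients.difference(potential_allergens)
-- ===== SOURCE B (Python) =====
-- def cant_be_allergen(foods):
--     # One pass over foods: intersect candidate ingredients per allergen as we go.
--     possibilities = {}
--     for ingredients, allergens in foods:
--         ing = set(ingredients)
--         for allergen in allergens:
--             if allergen in possibilities:
--                 possibilities[allergen] = possibilities[allergen] & ing
--             else:
--                 possibilities[allergen] = ing
--     potential = set()
--     for p in possibilities.values():
--         potential |= p
--     return {i for ingredients, _ in foods for i in ingredients if i not in potential}
-- ===== Notes on version B (the rewrite author's own statement) =====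
-- stated objective: faster
-- what changed: Replaces A's per-allergen rescan of the whole food list by a single pass over foods that intersects each listed allergen's candidate-ingredient set in a dict, then collects the safe ingredients directly.
import Mathlib
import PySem

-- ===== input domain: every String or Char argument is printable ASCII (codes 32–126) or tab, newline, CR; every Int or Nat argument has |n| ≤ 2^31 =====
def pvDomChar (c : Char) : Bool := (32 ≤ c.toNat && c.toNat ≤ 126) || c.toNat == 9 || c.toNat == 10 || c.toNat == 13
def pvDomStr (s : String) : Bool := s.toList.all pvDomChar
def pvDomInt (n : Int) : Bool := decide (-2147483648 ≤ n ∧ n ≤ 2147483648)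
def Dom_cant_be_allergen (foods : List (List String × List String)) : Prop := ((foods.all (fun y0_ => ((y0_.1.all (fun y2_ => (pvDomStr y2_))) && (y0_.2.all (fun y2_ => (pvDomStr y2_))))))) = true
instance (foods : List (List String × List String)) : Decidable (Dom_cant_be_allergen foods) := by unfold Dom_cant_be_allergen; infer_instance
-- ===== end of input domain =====

-- B replaces A's per-allergen rescan of all foods by one pass over foods maintaining the
-- per-allergen intersections in a dict; the equivalence is total (no Pre_).

-- ===== PORT A =====
-- inner loop body of A's 'for food in foods' under 'for allergen in all_allergens'
def pvInnerA (allergen : String) (d : PySem.Dict String (PySem.Set String))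
    (food : List String × List String) : PySem.Dict String (PySem.Set String) :=
  if allergen ∈ food.2 then
    if d.contains allergen = false then
      -- copy(food[0]) copies the ingredient set; Set.ofList is exact on the distinct-element encoding
      d.insert allergen (PySem.Set.ofList food.1)
    else
      -- allergen_possibilities[allergen].intersection_update(food[0])
      d.insert allergen (PySem.Set.inter (d.getD allergen PySem.Set.empty) (PySem.Set.ofList food.1))
  else d

def cant_be_allergen (foods : List (List String × List String)) : List String :=
  let all_ingredients := foods.foldl (fun s food => PySem.Set.update s food.1) PySem.Set.empty
  let all_allergens := foods.foldl (fun s food => PySem.Set.update s food.2) PySem.Set.empty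
  let allergen_possibilities :=
    all_allergens.foldl (fun d allergen => foods.foldl (pvInnerA allergen) d) PySem.Dict.empty
  let potential_allergens :=
    allergen_possibilities.values.foldl (fun s p => PySem.Set.update s p) PySem.Set.empty
  PySem.Set.diff all_ingredients potential_allergens

-- ===== PORT B =====
-- body of B's single 'for ingredients, allergens in foods' pass
def pvStepB (d : PySem.Dict String (PySem.Set String))
    (food : List String × List String) : PySem.Dict String (PySem.Set String) :=
  let ing := PySem.Set.ofList food.1
  food.2.foldl (fun d allergen =>
    if d.contains allergen = true then
      d.insert allergen (PySem.Set.inter (d.getD allergen PySem.Set.empty) ing)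
    else
      d.insert allergen ing) d

def cant_be_allergen_alt (foods : List (List String × List String)) : List String :=
  let possibilities := foods.foldl pvStepB PySem.Dict.empty
  let potential := possibilities.values.foldl (fun s p => PySem.Set.union s p) PySem.Set.empty
  foods.foldl (fun r food =>
    food.1.foldl (fun r i => if potential.contains i then r else PySem.Set.add r i) r)
    PySem.Set.empty

-- ===== PRECONDITION & SPEC =====
def Spec_cant_be_allergen (foods : List (List String × List String)) (out : List String) : Prop :=
  out = cant_be_allergen_alt foods
instance (foods : List (List String × List String)) (out : List String) :
    Decidable (Spec_cant_be_allergen foods out) := by unfold Spec_cant_be_allergen; infer_instance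

-- ===== CLAIM (what is proved, stated in full; the proofs are below) =====
def Claim_equal_cant_be_allergen : Prop :=
  ∀ (foods : List (List String × List String)), Dom_cant_be_allergen foods →
    Spec_cant_be_allergen foods (cant_be_allergen foods)

-- ===== LEMMAS AND PROOFS =====

-- the per-allergen accumulator: what either program's dict entry for k holds after a scan of fs
def pvAcc (k : String) (o : Option (PySem.Set String)) (fs : List (List String × List String)) :
    Option (PySem.Set String) :=
  fs.foldl (fun o f =>
    if k ∈ f.2 then
      some (match o with
        | none => PySem.Set.ofList f.1
        | some s => PySem.Set.inter s (PySem.Set.ofList f.1))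
    else o) o

theorem pvAcc_noop (k : String) (o : Option (PySem.Set String))
    (fs : List (List String × List String)) (h : ∀ f ∈ fs, k ∉ f.2) : pvAcc k o fs = o := by
  induction fs generalizing o with
  | nil => rfl
  | cons f fs ih =>
    unfold pvAcc
    rw [List.foldl_cons, if_neg (h f List.mem_cons_self)]
    exact ih o (fun g hg => h g (List.mem_cons_of_mem _ hg))

theorem pvAcc_cons (k : String) (o : Option (PySem.Set String))
    (f : List String × List String) (fs : List (List String × List String)) :
    pvAcc k o (f :: fs) =
      pvAcc k (if k ∈ f.2 then
        some (match o with
          | none => PySem.Set.ofList f.1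
          | some s => PySem.Set.inter s (PySem.Set.ofList f.1))
        else o) fs := rfl

theorem pvSet_inter_self (s : PySem.Set String) : PySem.Set.inter s s = s := by
  simp only [PySem.Set.inter]
  apply List.filter_eq_self.2
  intro x hx
  simpa [PySem.Set.contains] using hx

theorem pvInter_inter_self (s t : PySem.Set String) :
    PySem.Set.inter (PySem.Set.inter s t) t = PySem.Set.inter s t := by
  simp only [PySem.Set.inter, List.filter_filter]
  apply List.filter_congr
  intro x _
  cases h : PySem.Set.contains t x <;> simp

theorem pvMem_foldl_update (vs : List (PySem.Set String)) (init : PySem.Set String) (x : String) :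
    x ∈ vs.foldl (fun s p => PySem.Set.update s p) init ↔ x ∈ init ∨ ∃ p ∈ vs, x ∈ p := by
  induction vs generalizing init with
  | nil => simp
  | cons v vs ih =>
    simp only [List.foldl_cons, ih, PySem.Set.mem_update, List.mem_cons]
    constructor
    · rintro ((h | h) | ⟨p, hp, hx⟩)
      · exact Or.inl h
      · exact Or.inr ⟨v, Or.inl rfl, h⟩
      · exact Or.inr ⟨p, Or.inr hp, hx⟩
    · rintro (h | ⟨p, (rfl | hp), hx⟩)
      · exact Or.inl (Or.inl h)
      · exact Or.inl (Or.inr hx)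
      · exact Or.inr ⟨p, hp, hx⟩

theorem pvMem_foldl_update_pick (fs : List (List String × List String))
    (pick : (List String × List String) → List String) (init : PySem.Set String) (x : String) :
    x ∈ fs.foldl (fun s f => PySem.Set.update s (pick f)) init ↔
      x ∈ init ∨ ∃ f ∈ fs, x ∈ pick f := by
  induction fs generalizing init with
  | nil => simp
  | cons f fs ih =>
    simp only [List.foldl_cons, ih, PySem.Set.mem_update, List.mem_cons]
    constructor
    · rintro ((h | h) | ⟨g, hg, hx⟩)
      · exact Or.inl h
      · exact Or.inr ⟨f, Or.inl rfl, h⟩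
      · exact Or.inr ⟨g, Or.inr hg, hx⟩
    · rintro (h | ⟨g, (rfl | hg), hx⟩)
      · exact Or.inl (Or.inl h)
      · exact Or.inl (Or.inr hx)
      · exact Or.inr ⟨g, hg, hx⟩

theorem pvMem_values_iff {d : PySem.Dict String (PySem.Set String)} (hnd : d.keys.Nodup)
    (v : PySem.Set String) : v ∈ d.values ↔ ∃ k, d.get? k = some v := by
  simp only [PySem.Dict.values, List.mem_map]
  constructor
  · rintro ⟨⟨k, w⟩, hm, rfl⟩
    exact ⟨k, PySem.Dict.get?_of_mem_items d hm hnd⟩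
  · rintro ⟨k, hk⟩
    exact ⟨(k, v), PySem.Dict.mem_items_of_get?_eq_some d hk, rfl⟩

theorem pvNodup_foldl_update (fs : List (List String × List String))
    (pick : (List String × List String) → List String) (s : PySem.Set String) (hs : s.Nodup) :
    (fs.foldl (fun s f => PySem.Set.update s (pick f)) s).Nodup := by
  induction fs generalizing s with
  | nil => exact hs
  | cons f fs ih => exact ih _ (PySem.Set.nodup_update s (pick f) hs)

theorem pvNodupKeys_innerA (alg : String) (fs : List (List String × List String))
    (d : PySem.Dict String (PySem.Set String)) (hd : d.keys.Nodup) :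
    (fs.foldl (pvInnerA alg) d).keys.Nodup := by
  induction fs generalizing d with
  | nil => exact hd
  | cons f fs ih =>
    refine ih _ ?_
    unfold pvInnerA
    split_ifs <;> first
      | exact PySem.Dict.nodup_keys_insert _ _ _ hd
      | exact hd

theorem pvNodupKeys_outerA (foods : List (List String × List String)) (algs : List String)
    (d : PySem.Dict String (PySem.Set String)) (hd : d.keys.Nodup) :
    (algs.foldl (fun d alg => foods.foldl (pvInnerA alg) d) d).keys.Nodup := by
  induction algs generalizing d with
  | nil => exact hd
  | cons a algs ih => exact ih _ (pvNodupKeys_innerA a foods d hd)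

theorem pvNodupKeys_B (fs : List (List String × List String))
    (d : PySem.Dict String (PySem.Set String)) (hd : d.keys.Nodup) :
    (fs.foldl pvStepB d).keys.Nodup := by
  induction fs generalizing d with
  | nil => exact hd
  | cons f fs ih =>
    refine ih _ ?_
    unfold pvStepB
    have : ∀ (as : List String) (d : PySem.Dict String (PySem.Set String)), d.keys.Nodup →
        (as.foldl (fun d allergen =>
          if d.contains allergen = true then
            d.insert allergen (PySem.Set.inter (d.getD allergen PySem.Set.empty) (PySem.Set.ofList f.1))
          else d.insert allergen (PySem.Set.ofList f.1)) d).keys.Nodup := by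
      intro as
      induction as with
      | nil => exact fun d hd => hd
      | cons a as ih2 =>
        intro d hd
        refine ih2 _ ?_
        dsimp only
        split_ifs <;> exact PySem.Dict.nodup_keys_insert _ _ _ hd
    exact this f.2 d hd

theorem pvGet?_innerA (alg : String) (fs : List (List String × List String))
    (d : PySem.Dict String (PySem.Set String)) (k : String) :
    (fs.foldl (pvInnerA alg) d).get? k =
      if k = alg then pvAcc alg (d.get? alg) fs else d.get? k := by
  induction fs generalizing d with
  | nil =>
    simp only [List.foldl_nil, pvAcc]
    split_ifs with h
    · subst h; rfl
    · rfl
  | cons f fs ih =>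
    by_cases hf : alg ∈ f.2
    · cases hda : d.get? alg with
      | none =>
        have hc : d.contains alg = false := by
          rw [PySem.Dict.contains_eq_isSome_get?, hda]; rfl
        have h1 : pvInnerA alg d f = d.insert alg (PySem.Set.ofList f.1) := by
          unfold pvInnerA; simp [hf, hc]
        rw [List.foldl_cons, h1, ih, pvAcc_cons, if_pos hf]
        by_cases hk : k = alg <;> simp [PySem.Dict.get?_insert, hk]
      | some s =>
        have hc : ¬ d.contains alg = false := by
          rw [PySem.Dict.contains_eq_isSome_get?, hda]; simp
        have h1 : pvInnerA alg d f =
            d.insert alg (PySem.Set.inter s (PySem.Set.ofList f.1)) := by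
          unfold pvInnerA
          rw [if_pos hf, if_neg hc, PySem.Dict.getD_eq_get?_getD, hda]
          rfl
        rw [List.foldl_cons, h1, ih, pvAcc_cons, if_pos hf]
        by_cases hk : k = alg <;> simp [PySem.Dict.get?_insert, hk]
    · have h1 : pvInnerA alg d f = d := by unfold pvInnerA; simp [hf]
      rw [List.foldl_cons, h1, ih, pvAcc_cons, if_neg hf]

theorem pvGet?_outerA (foods : List (List String × List String))
    (algs : List String) (hnd : algs.Nodup)
    (d : PySem.Dict String (PySem.Set String)) (hnone : ∀ a ∈ algs, d.get? a = none)
    (k : String) :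
    (algs.foldl (fun d alg => foods.foldl (pvInnerA alg) d) d).get? k =
      if k ∈ algs then pvAcc k none foods else d.get? k := by
  induction algs generalizing d with
  | nil => simp
  | cons a algs ih =>
    rw [List.foldl_cons]
    set d' := foods.foldl (pvInnerA a) d with hd'
    have hget : ∀ j, d'.get? j =
        if j = a then pvAcc a (d.get? a) foods else d.get? j := fun j =>
      pvGet?_innerA a foods d j
    have hnone' : ∀ b ∈ algs, d'.get? b = none := by
      intro b hb
      have hba : b ≠ a := by
        rintro rfl; exact (List.nodup_cons.1 hnd).1 hb
      rw [hget b, if_neg hba]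
      exact hnone b (List.mem_cons_of_mem _ hb)
    rw [ih hnd.of_cons d' hnone']
    by_cases hk : k ∈ algs
    · simp [hk]
    · rw [if_neg hk, hget k]
      by_cases hka : k = a
      · subst hka
        rw [hnone k List.mem_cons_self]
        simp
      · simp [hka, hk]

theorem pvGet?_innerB (ing : PySem.Set String) (as : List String)
    (d : PySem.Dict String (PySem.Set String)) (k : String) :
    (as.foldl (fun d allergen =>
        if d.contains allergen = true then
          d.insert allergen (PySem.Set.inter (d.getD allergen PySem.Set.empty) ing)
        else d.insert allergen ing) d).get? k =
      if k ∈ as then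
        some (match d.get? k with
          | none => ing
          | some s => PySem.Set.inter s ing)
      else d.get? k := by
  induction as generalizing d with
  | nil => simp
  | cons a as ih =>
    have hstep : (if d.contains a = true then
          d.insert a (PySem.Set.inter (d.getD a PySem.Set.empty) ing)
        else d.insert a ing) =
        d.insert a (match d.get? a with
          | none => ing
          | some s => PySem.Set.inter s ing) := by
      cases hda : d.get? a with
      | none =>
        rw [if_neg]
        rw [PySem.Dict.contains_eq_isSome_get?, hda]
        simp
      | some s =>
        have hc : d.contains a = true := by
          rw [PySem.Dict.contains_eq_isSome_get?, hda]; rfl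
        rw [if_pos hc, PySem.Dict.getD_eq_get?_getD, hda]
        rfl
    rw [List.foldl_cons, hstep, ih]
    by_cases hk : k ∈ as
    · rw [if_pos hk, if_pos (List.mem_cons_of_mem _ hk), PySem.Dict.get?_insert]
      by_cases hka : k = a
      · subst hka
        rw [if_pos rfl]
        cases d.get? k with
        | none => simp [pvSet_inter_self]
        | some s => simp [pvInter_inter_self]
      · rw [if_neg hka]
    · rw [if_neg hk, PySem.Dict.get?_insert]
      by_cases hka : k = a
      · subst hka; simp
      · simp [hka, hk]

theorem pvGet?_outerB (fs : List (List String × List String))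
    (d : PySem.Dict String (PySem.Set String)) (k : String) :
    (fs.foldl pvStepB d).get? k = pvAcc k (d.get? k) fs := by
  induction fs generalizing d with
  | nil => rfl
  | cons f fs ih =>
    rw [List.foldl_cons, ih, pvAcc_cons]
    have hstep : (pvStepB d f).get? k =
        if k ∈ f.2 then
          some (match d.get? k with
            | none => PySem.Set.ofList f.1
            | some s => PySem.Set.inter s (PySem.Set.ofList f.1))
        else d.get? k := pvGet?_innerB (PySem.Set.ofList f.1) f.2 d k
    rw [hstep]

theorem pvDiff_add (s t : PySem.Set String) (x : String) :
    PySem.Set.diff (PySem.Set.add s x) t =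
      if t.contains x then PySem.Set.diff s t else PySem.Set.add (PySem.Set.diff s t) x := by
  simp only [PySem.Set.diff, PySem.Set.add, PySem.Set.contains, List.contains_eq_mem]
  by_cases ht : x ∈ t <;> by_cases hs : x ∈ s <;>
    simp [hs, ht, List.filter_append, List.mem_filter]

theorem pvFilter_inner (t : PySem.Set String) (xs : List String) (s : PySem.Set String) :
    xs.foldl (fun r i => if t.contains i then r else PySem.Set.add r i) (PySem.Set.diff s t) =
      PySem.Set.diff (PySem.Set.update s xs) t := by
  induction xs generalizing s with
  | nil => rfl
  | cons x xs ih =>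
    rw [List.foldl_cons, ← pvDiff_add s t x]
    exact ih (PySem.Set.add s x)

theorem pvFilter_outer (t : PySem.Set String) (fs : List (List String × List String))
    (s : PySem.Set String) :
    fs.foldl (fun r food =>
        food.1.foldl (fun r i => if t.contains i then r else PySem.Set.add r i) r)
      (PySem.Set.diff s t) =
      PySem.Set.diff (fs.foldl (fun s food => PySem.Set.update s food.1) s) t := by
  induction fs generalizing s with
  | nil => rfl
  | cons f fs ih =>
    rw [List.foldl_cons, List.foldl_cons, pvFilter_inner t f.1 s]
    exact ih (PySem.Set.update s f.1)

theorem pvDiff_congr (s t t' : PySem.Set String) (h : ∀ x, x ∈ t ↔ x ∈ t') :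
    PySem.Set.diff s t = PySem.Set.diff s t' := by
  simp only [PySem.Set.diff]
  apply List.filter_congr
  intro x _
  have : t.contains x = t'.contains x := by
    simp only [PySem.Set.contains, List.contains_eq_mem]
    simp [h x]
  rw [this]

-- ===== VERDICT (by name: the statement is the Claim_ definition above) =====
theorem cant_be_allergen_spec : Claim_equal_cant_be_allergen := by
  intro foods _
  show cant_be_allergen foods = cant_be_allergen_alt foods
  simp only [cant_be_allergen, cant_be_allergen_alt]
  set AI := foods.foldl (fun s food => PySem.Set.update s food.1) PySem.Set.empty with hAI
  set AA := foods.foldl (fun s food => PySem.Set.update s food.2) PySem.Set.empty with hAA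
  set apA := AA.foldl (fun d alg => foods.foldl (pvInnerA alg) d) PySem.Dict.empty with hap
  set potA := apA.values.foldl (fun s p => PySem.Set.update s p) PySem.Set.empty with hpotA
  set possB := foods.foldl pvStepB PySem.Dict.empty with hposs
  set potB := possB.values.foldl (fun s p => PySem.Set.union s p) PySem.Set.empty with hpotB
  -- B's final accumulation loop is the same set difference
  have hBout : foods.foldl (fun r food =>
        food.1.foldl (fun r i => if potB.contains i then r else PySem.Set.add r i) r)
        PySem.Set.empty = PySem.Set.diff AI potB := by
    have h0 : (PySem.Set.empty : PySem.Set String) = PySem.Set.diff PySem.Set.empty potB := rfl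
    rw [h0, pvFilter_outer potB foods PySem.Set.empty, hAI]
  rw [hBout]
  refine pvDiff_congr AI potA potB ?_
  have hndAA : AA.Nodup := pvNodup_foldl_update foods (fun f => f.2) PySem.Set.empty List.nodup_nil
  have hmemAA : ∀ a, a ∈ AA ↔ ∃ f ∈ foods, a ∈ f.2 := by
    intro a
    rw [hAA, pvMem_foldl_update_pick foods (fun f => f.2) PySem.Set.empty a]
    simp [PySem.Set.empty]
  -- both dicts hold the same entry for every key: the left-to-right intersection pvAcc
  have hgetA : ∀ k, apA.get? k = pvAcc k none foods := by
    intro k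
    rw [hap, pvGet?_outerA foods AA hndAA PySem.Dict.empty
      (fun a _ => PySem.Dict.get?_empty a) k]
    split_ifs with hk
    · rfl
    · rw [PySem.Dict.get?_empty, pvAcc_noop]
      intro f hf hkf
      exact hk ((hmemAA k).2 ⟨f, hf, hkf⟩)
  have hgetB : ∀ k, possB.get? k = pvAcc k none foods := by
    intro k
    rw [hposs, pvGet?_outerB foods PySem.Dict.empty k, PySem.Dict.get?_empty]
  have hndA : apA.keys.Nodup := by
    rw [hap]
    exact pvNodupKeys_outerA foods AA PySem.Dict.empty
      (by rw [PySem.Dict.keys_empty]; exact List.nodup_nil)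
  have hndB : possB.keys.Nodup := by
    rw [hposs]
    exact pvNodupKeys_B foods PySem.Dict.empty
      (by rw [PySem.Dict.keys_empty]; exact List.nodup_nil)
  intro x
  have hA : x ∈ potA ↔ ∃ k v, pvAcc k none foods = some v ∧ x ∈ v := by
    rw [hpotA, pvMem_foldl_update apA.values PySem.Set.empty x]
    simp only [PySem.Set.empty, List.not_mem_nil, false_or]
    constructor
    · rintro ⟨v, hv, hx⟩
      obtain ⟨k, hk⟩ := (pvMem_values_iff hndA v).1 hv
      exact ⟨k, v, hgetA k ▸ hk, hx⟩
    · rintro ⟨k, v, hk, hx⟩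
      exact ⟨v, (pvMem_values_iff hndA v).2 ⟨k, (hgetA k).symm ▸ hk⟩, hx⟩
  have hB : x ∈ potB ↔ ∃ k v, pvAcc k none foods = some v ∧ x ∈ v := by
    have hpotB' : potB = possB.values.foldl (fun s p => PySem.Set.update s p) PySem.Set.empty := rfl
    rw [hpotB', pvMem_foldl_update possB.values PySem.Set.empty x]
    simp only [PySem.Set.empty, List.not_mem_nil, false_or]
    constructor
    · rintro ⟨v, hv, hx⟩
      obtain ⟨k, hk⟩ := (pvMem_values_iff hndB v).1 hv
      exact ⟨k, v, hgetB k ▸ hk, hx⟩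
    · rintro ⟨k, v, hk, hx⟩
      exact ⟨v, (pvMem_values_iff hndB v).2 ⟨k, (hgetB k).symm ▸ hk⟩, hx⟩
  exact hA.trans hB.symm
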